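-- pv_equiv track=rewrite | github.com/breezy-team/breezy | breezy/bzr/pack_repo.py | pack_distribution
-- ===== SOURCE A (Python) =====
-- def pack_distribution(total_revisions):
--     """Generate a list of the number of revisions to put in each pack.
--
--     :param total_revisions: The total number of revisions in the
--         repository.
--     """
--     if total_revisions == 0:
--         return [0]
--     digits = reversed(str(total_revisions))
--     result = []
--     for exponent, count in enumerate(digits):
--         size = 10**exponent
--         for _pos in range(int(count)):
--             result.append(size)
--     return list(reversed(result))
-- ===== SOURCE B (Python) =====
-- def pack_distribution(total_revisions):
--     """Generate a list of the number of revisions to put in each pack.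
--
--     Greedy algorithm: each element of the result is produced by
--     subtracting the largest power of ten not exceeding what is still
--     left, until nothing remains.  No digit extraction at all: the loop
--     runs once per OUTPUT element, and the powers come out in descending
--     order automatically because the remainder only shrinks.
--
--     :param total_revisions: The total number of revisions in the
--         repository.
--     """
--     if total_revisions == 0:
--         return [0]
--     power = 1
--     while power * 10 <= total_revisions:
--         power *= 10
--     result = []
--     remaining = total_revisions
--     while remaining > 0:
--         while power > remaining:
--             power //= 10
--         result.append(power)
--         remaining -= power
--     return result
-- ===== Notes on version B (the rewrite author's own statement) =====
-- stated objective: alternative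
-- what changed: Replaces A's per-digit expansion (str(), reversed, enumerate, an inner range(digit) loop, and a final reversal) with a greedy loop that runs once per output element, each step subtracting the largest power of ten not exceeding the remainder; no digit is ever extracted and no list is reversed.
import Mathlib
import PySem

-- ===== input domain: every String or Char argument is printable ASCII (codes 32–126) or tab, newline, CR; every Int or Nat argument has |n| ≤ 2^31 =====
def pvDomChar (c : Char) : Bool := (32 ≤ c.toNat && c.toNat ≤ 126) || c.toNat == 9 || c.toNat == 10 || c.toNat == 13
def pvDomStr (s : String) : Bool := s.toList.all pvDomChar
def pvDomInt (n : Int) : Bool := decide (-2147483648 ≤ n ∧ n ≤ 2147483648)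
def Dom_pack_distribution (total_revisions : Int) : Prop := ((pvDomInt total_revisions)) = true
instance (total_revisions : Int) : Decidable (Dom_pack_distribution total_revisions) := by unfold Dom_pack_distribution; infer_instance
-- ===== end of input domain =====

-- B replaces A's per-digit expansion with a greedy loop subtracting the largest
-- power of ten ≤ remainder once per output element; return values agree on all
-- total_revisions ≥ 0 (A raises ValueError on negatives, where B returns []).

-- ===== PORT A =====
-- enumerate(reversed(str(n))) is ported as (toChars n).reverse.zipIdx (pair order swapped
-- component-wise); int(count) is PySem.Int.ofChars? totalized with .getD 0 — it is none
-- exactly where Python's int() raises ValueError (the '-' of a negative n), outside Pre_.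
def pack_distribution (total_revisions : Int) : List Int :=
  if total_revisions == 0 then [0]
  else
    let digits := (PySem.Int.toChars total_revisions).reverse
    let result := (digits.zipIdx).foldl
      (fun result ce =>
        let size : Int := 10 ^ ce.2
        (PySem.List.pyRange 0 ((PySem.Int.ofChars? [ce.1]).getD 0) 1).foldl
          (fun r _pos => r ++ [size]) result) []
    result.reverse

-- ===== PORT B =====
-- the three while-loops of Source B, each as a fuel recursion; every fuel argument is
-- large enough that it never runs out on the admitted inputs (proved in the lemmas),
-- it only makes the recursion structural.

-- while power * 10 <= total_revisions: power *= 10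
def pdFind (fuel : Nat) (power n : Int) : Int :=
  match fuel with
  | 0 => power
  | fuel + 1 => if power * 10 ≤ n then pdFind fuel (power * 10) n else power

-- while power > remaining: power //= 10
def pdLower (fuel : Nat) (power remaining : Int) : Int :=
  match fuel with
  | 0 => power
  | fuel + 1 =>
    if remaining < power then pdLower fuel (PySem.Int.floordiv power 10) remaining
    else power

-- while remaining > 0: lower power; result.append(power); remaining -= power
def pdOuter (fuel : Nat) (remaining power : Int) (result : List Int) : List Int :=
  match fuel with
  | 0 => result
  | fuel + 1 =>
    if 0 < remaining then
      let p := pdLower power.toNat power remaining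
      pdOuter fuel (remaining - p) p (result ++ [p])
    else result

def pack_distribution_alt (total_revisions : Int) : List Int :=
  if total_revisions == 0 then [0]
  else
    pdOuter (total_revisions.toNat + 1) total_revisions
      (pdFind (total_revisions.toNat + 1) 1 total_revisions) []

-- ===== PRECONDITION & SPEC =====
-- Pre_ excludes exactly the negative inputs, on which A raises ValueError (int('-')).
def Pre_pack_distribution (total_revisions : Int) : Prop := 0 ≤ total_revisions
instance (total_revisions : Int) : Decidable (Pre_pack_distribution total_revisions) := by
  unfold Pre_pack_distribution; infer_instance
def pvWitness_pack_distribution : Int := (350)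

def Spec_pack_distribution (total_revisions : Int) (out : List Int) : Prop :=
  out = pack_distribution_alt total_revisions
instance (total_revisions : Int) (out : List Int) : Decidable (Spec_pack_distribution total_revisions out) := by
  unfold Spec_pack_distribution; infer_instance

-- ===== CLAIM (what is proved, stated in full; the proofs are below) =====
def Claim_equal_pack_distribution : Prop := ∀ (total_revisions : Int), Dom_pack_distribution total_revisions → Pre_pack_distribution total_revisions → Spec_pack_distribution total_revisions (pack_distribution total_revisions)

-- ===== LEMMAS AND PROOFS =====

-- the list A produces before its final reversal: digits LSD-first, ascending powers
def ascBuild : List Nat → Int → List Int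
  | [], _ => []
  | d :: ds, p => List.replicate d p ++ ascBuild ds (p * 10)

-- the greedy normal form: 10^(log₁₀ m) pulled off the front, recursively
def Dm (m : Nat) : List Int :=
  if h : m = 0 then []
  else ((10 : Int) ^ (Nat.log 10 m)) :: Dm (m - 10 ^ (Nat.log 10 m))
termination_by m
decreasing_by
  have h1 : 1 ≤ 10 ^ (Nat.log 10 m) := Nat.one_le_pow _ _ (by norm_num)
  omega

lemma toDigitsCore_eq (fuel : Nat) : ∀ m, 0 < m → m < fuel → ∀ ds : List Char,
    Nat.toDigitsCore 10 fuel m ds = ((Nat.digits 10 m).reverse.map Nat.digitChar) ++ ds := by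
  induction fuel with
  | zero => intro m hm hf ds; omega
  | succ fuel ih =>
    intro m hm hf ds
    rw [Nat.toDigitsCore]
    by_cases h0 : m / 10 = 0
    · have hdm : Nat.digits 10 m = [m % 10] := by
        rw [Nat.digits_def' (by norm_num) hm, h0]; simp
      simp [h0, hdm]
    · have hlt : m / 10 < fuel :=
        Nat.lt_of_lt_of_le (Nat.div_lt_self hm (by norm_num)) (Nat.lt_succ_iff.mp hf)
      rw [if_neg h0, ih (m / 10) (Nat.pos_of_ne_zero h0) hlt]
      rw [Nat.digits_def' (by norm_num : (1:Nat) < 10) hm]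
      simp

lemma toChars_pos (m : Nat) (hm : 0 < m) :
    PySem.Int.toChars (m : Int) = (Nat.digits 10 m).reverse.map Nat.digitChar := by
  have : ¬ ((m : Int) < 0) := by omega
  simp only [PySem.Int.toChars, if_neg this, Int.toNat_natCast]
  rw [Nat.toDigits, toDigitsCore_eq (m + 1) m hm (Nat.lt_succ_self m)]
  simp

lemma ofChars_digitChar (d : Nat) (hd : d < 10) :
    PySem.Int.ofChars? [Nat.digitChar d] = some (d : Int) := by
  interval_cases d <;> decide

lemma foldA (ds : List Nat) (hds : ∀ d ∈ ds, d < 10) : ∀ (k : Nat) (acc : List Int),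
    ((ds.map Nat.digitChar).zipIdx k).foldl
      (fun result ce =>
        let size : Int := 10 ^ ce.2
        (PySem.List.pyRange 0 ((PySem.Int.ofChars? [ce.1]).getD 0) 1).foldl
          (fun r _pos => r ++ [size]) result) acc
    = acc ++ ascBuild ds ((10 : Int) ^ k) := by
  induction ds with
  | nil => intro k acc; simp [ascBuild]
  | cons d tl ih =>
    intro k acc
    have hd : d < 10 := hds d (by simp)
    simp only [List.map_cons, List.zipIdx_cons, List.foldl_cons]
    rw [ih (fun x hx => hds x (by simp [hx])) (k + 1)]
    have hinner :
        (PySem.List.pyRange 0 ((PySem.Int.ofChars? [Nat.digitChar d]).getD 0) 1).foldl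
          (fun r (_pos : Int) => r ++ [(10 : Int) ^ k]) acc
        = acc ++ List.replicate d ((10 : Int) ^ k) := by
      rw [ofChars_digitChar d hd]
      rw [show ((some (d : Int)).getD 0) = ((d : Nat) : Int) from rfl]
      rw [PySem.List.pyRange_zero_natCast d,
        PySem.List.foldl_append_singleton_eq_map (fun _ => (10 : Int) ^ k)]
      simp [List.eq_replicate_iff]
    simp only [hinner, ascBuild]
    rw [pow_succ]
    simp [List.append_assoc]

-- pulling the top power of ten out of the digit expansion
lemma asc_top : ∀ m : Nat, 0 < m → ∀ c : Int,
    ascBuild (Nat.digits 10 m) c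
      = ascBuild (Nat.digits 10 (m - 10 ^ (Nat.log 10 m))) c
          ++ [c * (10 : Int) ^ (Nat.log 10 m)] := by
  intro m
  induction m using Nat.strong_induction_on with
  | _ m ih =>
    intro hm c
    by_cases h10 : m < 10
    · have hlog : Nat.log 10 m = 0 := Nat.log_of_lt h10
      have hd : Nat.digits 10 m = [m] := by
        rw [Nat.digits_def' (by norm_num : (1:Nat) < 10) hm,
          Nat.mod_eq_of_lt h10, Nat.div_eq_of_lt h10]
        simp
      rw [hlog, hd]
      rcases Nat.lt_or_ge m 2 with h2 | h2
      · have hm1 : m = 1 := by omega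
        subst hm1
        simp [ascBuild]
      · have hd' : Nat.digits 10 (m - 1) = [m - 1] := by
          rw [Nat.digits_def' (by norm_num : (1:Nat) < 10) (by omega),
            Nat.mod_eq_of_lt (by omega), Nat.div_eq_of_lt (by omega)]
          simp
        rw [pow_zero, hd']
        simp only [ascBuild, List.append_nil]
        rw [show m = (m - 1) + 1 by omega, List.replicate_succ']
        simp
    · -- m ≥ 10 : peel the last digit; q = m / 10 carries the top power
      have hq : 0 < m / 10 := by omega
      set q := m / 10 with hqdef
      set r := m % 10 with hrdef
      set L := Nat.log 10 q with hLdef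
      have hpl : 10 ^ L ≤ q := Nat.pow_log_le_self 10 (by omega)
      have hpu : q < 10 ^ (L + 1) := Nat.lt_pow_succ_log_self (by norm_num) q
      have hlogm : Nat.log 10 m = L + 1 := by
        apply Nat.log_eq_of_pow_le_of_lt_pow
        · calc 10 ^ (L + 1) = 10 ^ L * 10 := by ring
            _ ≤ q * 10 := by omega
            _ ≤ m := by omega
        · calc m = 10 * q + r := by omega
            _ < 10 * 10 ^ (L + 1) := by omega
            _ = 10 ^ (L + 1 + 1) := by ring
      have hdm : Nat.digits 10 m = r :: Nat.digits 10 q := by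
        rw [Nat.digits_def' (by norm_num : (1:Nat) < 10) hm]
      have hsub : m - 10 ^ (L + 1) = 10 * (q - 10 ^ L) + r := by
        have h1 : 10 ^ (L + 1) = 10 * 10 ^ L := by ring
        omega
      rw [hlogm, hdm, hsub]
      by_cases hz : q - 10 ^ L = 0 ∧ r = 0
      · obtain ⟨hz1, hz2⟩ := hz
        rw [hz1, hz2]
        simp only [ascBuild, mul_zero, List.replicate_zero, List.nil_append]
        rw [ih q (by omega) (by omega) (c * 10), hz1]
        simp only [Nat.digits_zero, ascBuild, List.nil_append]
        rw [show c * 10 * (10:Int) ^ L = c * 10 ^ (L + 1) by ring]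
        simp [ascBuild]
      · have hpos : 0 < 10 * (q - 10 ^ L) + r := by omega
        have hdm' : Nat.digits 10 (10 * (q - 10 ^ L) + r) = r :: Nat.digits 10 (q - 10 ^ L) := by
          rw [Nat.digits_def' (by norm_num : (1:Nat) < 10) hpos]
          congr 1
          · omega
          · congr 1; omega
        rw [hdm']
        simp only [ascBuild]
        rw [ih q (by omega) (by omega) (c * 10)]
        rw [List.append_assoc,
          show c * 10 * (10:Int) ^ L = c * 10 ^ (L + 1) by ring]

lemma rev_asc_eq_Dm : ∀ m : Nat, (ascBuild (Nat.digits 10 m) 1).reverse = Dm m := by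
  intro m
  induction m using Nat.strong_induction_on with
  | _ m ih =>
    by_cases hm : m = 0
    · subst hm
      rw [Dm]
      simp [ascBuild]
    · rw [asc_top m (Nat.pos_of_ne_zero hm) 1]
      have hlt : m - 10 ^ (Nat.log 10 m) < m := by
        have := Nat.one_le_pow (Nat.log 10 m) 10 (by norm_num)
        omega
      rw [List.reverse_append, ih _ hlt,
        show Dm m = 10 ^ Nat.log 10 m :: Dm (m - 10 ^ (Nat.log 10 m)) from by
          rw [Dm]; simp [hm]]
      simp

lemma pdLower_eq : ∀ k (m fuel : Nat), 0 < m → m < 10 ^ (k + 1) → k + 1 ≤ fuel →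
    pdLower fuel ((10 : Int) ^ k) (m : Int) = (10 : Int) ^ (Nat.log 10 m) := by
  intro k
  induction k with
  | zero =>
    intro m fuel hm hlt hfuel
    obtain ⟨fuel, rfl⟩ : ∃ f, fuel = f + 1 := ⟨fuel - 1, by omega⟩
    rw [pdLower, if_neg (by push_cast; omega),
      Nat.log_of_lt (by simpa using hlt)]
  | succ k ih =>
    intro m fuel hm hlt hfuel
    obtain ⟨fuel, rfl⟩ : ∃ f, fuel = f + 1 := ⟨fuel - 1, by omega⟩
    rw [pdLower]
    have hpow : ((10 : Int) ^ (k + 1)) = ((10 ^ (k + 1) : Nat) : Int) := by push_cast; ring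
    by_cases h : m < 10 ^ (k + 1)
    · rw [if_pos (by rw [hpow]; exact_mod_cast h)]
      have hdiv : PySem.Int.floordiv ((10 : Int) ^ (k + 1)) 10
          = (10 : Int) ^ k := by
        rw [show ((10 : Int) ^ (k + 1)) = ((10 ^ (k + 1) : Nat) : Int) by push_cast; ring,
          show ((10 : Int)) = ((10 : Nat) : Int) from rfl,
          PySem.Int.floordiv_natCast]
        push_cast [pow_succ, Nat.mul_div_cancel]
        ring
      rw [hdiv]
      exact ih m fuel hm h (by omega)
    · rw [if_neg (by rw [hpow]; exact_mod_cast h),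
        Nat.log_eq_of_pow_le_of_lt_pow (Nat.not_lt.mp h) hlt]

lemma pdFind_eq : ∀ fuel k (n : Nat), 10 ^ k ≤ n → n < 10 ^ (k + fuel) →
    pdFind fuel ((10 : Int) ^ k) (n : Int) = (10 : Int) ^ (Nat.log 10 n) := by
  intro fuel
  induction fuel with
  | zero =>
    intro k n h1 h2
    simp only [Nat.add_zero] at h2
    omega
  | succ fuel ih =>
    intro k n h1 h2
    rw [pdFind]
    have hpow : ((10 : Int) ^ k * 10) = ((10 ^ (k + 1) : Nat) : Int) := by push_cast; ring
    by_cases h : 10 ^ (k + 1) ≤ n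
    · rw [if_pos (by rw [hpow]; exact_mod_cast h)]
      rw [show ((10 : Int) ^ k * 10) = (10 : Int) ^ (k + 1) by ring]
      exact ih (k + 1) n h (by rw [show k + 1 + fuel = k + (fuel + 1) by omega]; exact h2)
    · rw [if_neg (by rw [hpow]; exact_mod_cast h),
        Nat.log_eq_of_pow_le_of_lt_pow h1 (by omega)]

lemma pdOuter_eq : ∀ fuel (m : Nat), m < fuel → ∀ k, m < 10 ^ (k + 1) → ∀ acc,
    pdOuter fuel (m : Int) ((10 : Int) ^ k) acc = acc ++ Dm m := by
  intro fuel
  induction fuel with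
  | zero => intro m hm; omega
  | succ fuel ih =>
    intro m hm k hk acc
    rw [pdOuter]
    by_cases hm0 : m = 0
    · subst hm0
      rw [if_neg (by norm_num), Dm]
      simp
    · rw [if_pos (by exact_mod_cast Nat.pos_of_ne_zero hm0)]
      have htn : ((10 : Int) ^ k).toNat = 10 ^ k := by
        rw [show ((10 : Int) ^ k) = ((10 ^ k : Nat) : Int) by push_cast; ring,
          Int.toNat_natCast]
      have hkf : k + 1 ≤ 10 ^ k := Nat.lt_pow_self (by norm_num)
      rw [htn, pdLower_eq k m (10 ^ k) (Nat.pos_of_ne_zero hm0) hk (by omega)]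
      show pdOuter fuel ((m : Int) - 10 ^ (Nat.log 10 m)) (10 ^ (Nat.log 10 m))
        (acc ++ [(10 : Int) ^ (Nat.log 10 m)]) = acc ++ Dm m
      have hple : 10 ^ (Nat.log 10 m) ≤ m := Nat.pow_log_le_self 10 hm0
      have hcast : (m : Int) - (10 : Int) ^ (Nat.log 10 m)
          = ((m - 10 ^ (Nat.log 10 m) : Nat) : Int) := by push_cast [hple]; ring
      rw [hcast]
      have hone : 1 ≤ 10 ^ (Nat.log 10 m) := Nat.one_le_pow _ _ (by norm_num)
      rw [ih (m - 10 ^ (Nat.log 10 m)) (by omega) (Nat.log 10 m)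
        (by have := Nat.lt_pow_succ_log_self (by norm_num : 1 < 10) m; omega)
        (acc ++ [(10 : Int) ^ (Nat.log 10 m)])]
      rw [show Dm m = 10 ^ Nat.log 10 m :: Dm (m - 10 ^ (Nat.log 10 m)) from by
        rw [Dm]; simp [hm0]]
      simp

lemma main_pos (m : Nat) (hm : 0 < m) :
    pack_distribution (m : Int) = pack_distribution_alt (m : Int) := by
  have hne : ¬ ((m : Int) == 0) = true := by simp; omega
  simp only [pack_distribution, pack_distribution_alt, if_neg hne]
  rw [toChars_pos m hm]
  rw [show (List.map Nat.digitChar (Nat.digits 10 m).reverse).reverse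
        = List.map Nat.digitChar (Nat.digits 10 m) by
      simp [← List.map_reverse]]
  rw [foldA (Nat.digits 10 m) (fun d hd => Nat.digits_lt_base (by norm_num) hd) 0 []]
  rw [show ((m : Int).toNat + 1) = m + 1 by simp]
  rw [show ((1 : Int)) = (10 : Int) ^ 0 from (pow_zero 10).symm]
  rw [pdFind_eq (m + 1) 0 m (by simpa using hm)
    (by have h : m < 10 ^ m := Nat.lt_pow_self (by norm_num)
        calc m < 10 ^ m := h
          _ ≤ 10 ^ (0 + (m + 1)) := Nat.pow_le_pow_right (by norm_num) (by omega))]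
  rw [pdOuter_eq (m + 1) m (Nat.lt_succ_self m) (Nat.log 10 m)
    (Nat.lt_pow_succ_log_self (by norm_num) m) []]
  rw [pow_zero]
  simpa using rev_asc_eq_Dm m

-- ===== VERDICT (by name: the statement is the Claim_ definition above) =====
theorem pack_distribution_spec : Claim_equal_pack_distribution := by
  intro n _hdom hpre
  unfold Spec_pack_distribution
  by_cases h0 : n = 0
  · subst h0; rfl
  · have hm : 0 < n.toNat := by unfold Pre_pack_distribution at hpre; omega
    have hn : n = (n.toNat : Int) := by omega
    rw [hn]
    exact main_pos n.toNat hm
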